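-- pv_equiv track=rewrite | github.com/cristina-ulinici/disert | new_li_optimized.py | interval_to_prefix
-- ===== SOURCE A (Python) =====
-- def interval_to_prefix(a, b, pref, res):
--     # pg 6
--     #1
--     k = 0
--     while (k < len(a) and a[k] == b[k]):
--         k += 1
--
--     #2
--     if (k == len(a)):
--         res.append(pref + a)
--         return res
--     #3
--     if (a[k:] == ''.join(['0' for i in range(0, len(a)-k)]) and b[k:] == ''.join(['1' for i in range(0, len(b)-k)])):
--         # res.add(a[:k])
--         res.append(pref + a[:k])
--         return res
--
--     #4 fix degeaba
--
--     #5
--     pref1 = pref + a[:k] + '0'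
--     pref2 = pref + a[:k] + '1'
--
--     interval_to_prefix(a[k+1:], ''.join(['1' for i in range(0, len(a)-k-1)]), pref1, res)
--     interval_to_prefix(''.join(['0' for i in range(0, len(a)-k-1)]), b[k+1:], pref2, res)
--
--     return res
-- ===== SOURCE B (Python) =====
-- def interval_to_prefix(a, b, pref, res):
--     # Iterative version: an explicit LIFO stack of (a, b, pref) frames replaces
--     # the recursion; like the original, it appends the prefixes to res in place.
--     stack = [(a, b, pref)]
--     while stack:
--         a, b, pref = stack.pop()
--         k = 0
--         for x, y in zip(a, b):
--             if x != y:
--                 break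
--             k += 1
--         if k == len(a):
--             res.append(pref + a)
--             continue
--         if a[k:] == '0' * (len(a) - k) and b[k:] == '1' * (len(b) - k):
--             res.append(pref + a[:k])
--             continue
--         head = pref + a[:k]
--         stack.append(('0' * (len(a) - k - 1), b[k + 1:], head + '1'))
--         stack.append((a[k + 1:], '1' * (len(a) - k - 1), head + '0'))
--     return res
-- ===== Notes on version B (the rewrite author's own statement) =====
-- stated objective: faster
-- what changed: The recursion is replaced by an explicit LIFO stack of (a, b, pref) frames (right sub-problem pushed first, so the left is expanded first), the common-prefix length is found by scanning zip(a, b) instead of an index-bounded while loop, and the all-0/all-1 strings are built with '0' * n instead of joining a list comprehension.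
import Mathlib
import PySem

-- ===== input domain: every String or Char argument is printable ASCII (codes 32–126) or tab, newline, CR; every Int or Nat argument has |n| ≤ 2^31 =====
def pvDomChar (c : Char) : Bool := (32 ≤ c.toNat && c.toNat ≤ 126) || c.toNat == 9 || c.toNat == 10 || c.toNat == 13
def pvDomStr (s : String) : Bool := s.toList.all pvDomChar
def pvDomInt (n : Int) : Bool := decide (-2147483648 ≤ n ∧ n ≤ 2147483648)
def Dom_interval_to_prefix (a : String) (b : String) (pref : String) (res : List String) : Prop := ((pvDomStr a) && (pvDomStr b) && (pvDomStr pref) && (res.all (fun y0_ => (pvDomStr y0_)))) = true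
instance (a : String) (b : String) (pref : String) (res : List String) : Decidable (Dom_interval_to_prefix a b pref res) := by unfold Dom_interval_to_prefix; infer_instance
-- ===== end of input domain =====

-- B replaces A's recursion by an explicit LIFO stack of (a, b, pref) frames and finds the
-- common-prefix length by scanning zipped character pairs; like A, Python B appends to the
-- caller's res list in place (the theorems below are about the returned value).

-- ===== PORT A =====
-- the `while (k < len(a) and a[k] == b[k]): k += 1` loop; b[k]? = none models the
-- IndexError read past the end of b (excluded by Pre_ below)
def pvAK (a b : List Char) (k : Nat) : Nat :=
  if _h : k < a.length then
    (if b[k]? = some a[k] then pvAK a b (k + 1) else k)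
  else k
termination_by a.length - k

-- cited by itpCoreA's decreasing_by
theorem pvAK_le (a b : List Char) (k : Nat) (h : k ≤ a.length) : pvAK a b k ≤ a.length := by
  fun_induction pvAK a b k <;> omega

-- the body of A, on character lists; ''.join(['0' for i in range(0, len(a)-k)]) is
-- List.replicate (a.length - k) '0' (exact: the range is empty for nonpositive bounds,
-- and here the bounds are the Nat differences shown)
def itpCoreA (a b pref : List Char) (res : List String) : List String :=
  let k := pvAK a b 0
  if _h1 : k = a.length then
    res ++ [String.ofList (pref ++ a)]
  else if _h2 : a.drop k = List.replicate (a.length - k) '0' ∧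
                b.drop k = List.replicate (b.length - k) '1' then
    res ++ [String.ofList (pref ++ a.take k)]
  else
    let pref1 := pref ++ a.take k ++ ['0']
    let pref2 := pref ++ a.take k ++ ['1']
    let res1 := itpCoreA (a.drop (k + 1)) (List.replicate (a.length - k - 1) '1') pref1 res
    itpCoreA (List.replicate (a.length - k - 1) '0') (b.drop (k + 1)) pref2 res1
termination_by a.length
decreasing_by
  · have := pvAK_le a b 0 (Nat.zero_le _)
    simp only [List.length_drop]
    omega
  · have := pvAK_le a b 0 (Nat.zero_le _)
    simp only [List.length_replicate]
    omega

def interval_to_prefix (a : String) (b : String) (pref : String) (res : List String) : List String :=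
  itpCoreA a.toList b.toList pref.toList res

-- ===== PORT B =====
-- `for x, y in zip(a, b): if x != y: break; k += 1`
def pvBK : List (Char × Char) → Nat
  | [] => 0
  | (x, y) :: t => if x ≠ y then 0 else pvBK t + 1

-- cited by pvBLoop's decreasing_by
theorem pvBK_len_le (l : List (Char × Char)) : pvBK l ≤ l.length := by
  induction l with
  | nil => simp [pvBK]
  | cons p t ih =>
    obtain ⟨x, y⟩ := p
    simp only [pvBK]
    split
    · simp
    · simp only [List.length_cons]
      omega

-- cited by pvBLoop's decreasing_by
theorem pvBK_zip_le (a b : List Char) : pvBK (a.zip b) ≤ a.length := by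
  have h := pvBK_len_le (a.zip b)
  simp only [List.length_zip] at h
  omega

-- the `while stack:` loop of B; the head of the list is the top of the stack
-- (stack.pop pops the last Python element, i.e. the most recently appended frame)
def pvBLoop (stack : List (List Char × List Char × List Char)) (res : List String) : List String :=
  match stack with
  | [] => res
  | (a, b, pref) :: rest =>
    let k := pvBK (a.zip b)
    if _h1 : k = a.length then
      pvBLoop rest (res ++ [String.ofList (pref ++ a)])
    else if _h2 : a.drop k = List.replicate (a.length - k) '0' ∧
                  b.drop k = List.replicate (b.length - k) '1' then
      pvBLoop rest (res ++ [String.ofList (pref ++ a.take k)])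
    else
      let head := pref ++ a.take k
      pvBLoop ((a.drop (k + 1), List.replicate (a.length - k - 1) '1', head ++ ['0']) ::
               (List.replicate (a.length - k - 1) '0', b.drop (k + 1), head ++ ['1']) :: rest) res
termination_by (stack.map (fun f => 3 ^ f.1.length)).sum
decreasing_by
  · have : 1 ≤ 3 ^ a.length := Nat.one_le_pow _ _ (by norm_num)
    simp only [List.map_cons, List.sum_cons]
    omega
  · have : 1 ≤ 3 ^ a.length := Nat.one_le_pow _ _ (by norm_num)
    simp only [List.map_cons, List.sum_cons]
    omega
  · have hk := pvBK_zip_le a b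
    have hlt : pvBK (a.zip b) < a.length := by omega
    have h3 : 3 ^ (a.length - pvBK (a.zip b) - 1) ≤ 3 ^ (a.length - 1) :=
      Nat.pow_le_pow_right (by norm_num) (by omega)
    have h4 : (3 : ℕ) ^ a.length = 3 ^ (a.length - 1) * 3 := by
      rw [← pow_succ]
      congr 1
      omega
    have h5 : 1 ≤ 3 ^ (a.length - 1) := Nat.one_le_pow _ _ (by norm_num)
    have h6 : a.length - (pvBK (a.zip b) + 1) = a.length - pvBK (a.zip b) - 1 := by omega
    simp only [List.map_cons, List.sum_cons, List.length_drop, List.length_replicate, h6]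
    omega

def interval_to_prefix_alt (a : String) (b : String) (pref : String) (res : List String) : List String :=
  pvBLoop [(a.toList, b.toList, pref.toList)] res

-- ===== PRECONDITION & SPEC =====
-- independent common-prefix length, used only by Pre_
def pvCommonLen : List Char → List Char → Nat
  | x :: xs, y :: ys => if x = y then pvCommonLen xs ys + 1 else 0
  | _, _ => 0

-- Pre_ excludes exactly the inputs on which Python A raises IndexError: those where b
-- becomes a proper prefix of a (so b[k] is read past the end of b) at some level of A's
-- recursion; the disjunction below is a closed form of that condition on a and b alone.
def Pre_interval_to_prefix (a : String) (b : String) (pref : String) (res : List String) : Prop :=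
  a.toList.length ≤ b.toList.length ∨
  (pvCommonLen a.toList b.toList < b.toList.length ∧
   ((a.toList.drop (pvCommonLen a.toList b.toList) =
       List.replicate (a.toList.length - pvCommonLen a.toList b.toList) '0' ∧
     b.toList.drop (pvCommonLen a.toList b.toList) =
       List.replicate (b.toList.length - pvCommonLen a.toList b.toList) '1') ∨
    (pvCommonLen a.toList b.toList + 1 < b.toList.length ∧ b.toList.getLast? = some '1')))
instance (a : String) (b : String) (pref : String) (res : List String) : Decidable (Pre_interval_to_prefix a b pref res) := by unfold Pre_interval_to_prefix; infer_instance

def pvWitness_interval_to_prefix : String × String × String × List String := ("01", "10", "", [])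

def Spec_interval_to_prefix (a : String) (b : String) (pref : String) (res : List String) (out : List String) : Prop := out = interval_to_prefix_alt a b pref res
instance (a : String) (b : String) (pref : String) (res : List String) (out : List String) : Decidable (Spec_interval_to_prefix a b pref res out) := by unfold Spec_interval_to_prefix; infer_instance

-- ===== CLAIM (what is proved, stated in full; the proofs are below) =====
def Claim_equal_interval_to_prefix : Prop := ∀ (a : String) (b : String) (pref : String) (res : List String), Dom_interval_to_prefix a b pref res → Pre_interval_to_prefix a b pref res → Spec_interval_to_prefix a b pref res (interval_to_prefix a b pref res)

-- ===== LEMMAS AND PROOFS =====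

-- A's while-loop counter and B's zip scan agree (on every input: when b runs out first,
-- b[k]? = none stops A's port just as the exhausted zip stops B's)
theorem pvAK_eq (a b : List Char) (k : Nat) :
    pvAK a b k = k + pvBK ((a.drop k).zip (b.drop k)) := by
  fun_induction pvAK a b k with
  | case1 k hlt heq ih =>
    have hb : k < b.length := by
      by_contra hge
      rw [List.getElem?_eq_none (by omega)] at heq
      simp at heq
    have hbk : b[k] = a[k] := by
      rw [List.getElem?_eq_getElem hb] at heq
      simpa using heq
    rw [ih, List.drop_eq_getElem_cons hlt, List.drop_eq_getElem_cons hb,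
        List.zip_cons_cons, pvBK]
    simp [hbk]
    omega
  | case2 k hlt hne =>
    by_cases hb : k < b.length
    · rw [List.drop_eq_getElem_cons hlt, List.drop_eq_getElem_cons hb, List.zip_cons_cons, pvBK]
      have : a[k] ≠ b[k] := by
        intro h
        exact hne (by rw [List.getElem?_eq_getElem hb, h])
      simp [this]
    · rw [show b.drop k = [] from List.drop_eq_nil_iff.mpr (by omega)]
      simp [pvBK]
  | case3 k hge =>
    rw [show a.drop k = [] from List.drop_eq_nil_iff.mpr (by omega)]
    simp [pvBK]

theorem pvBK_eq_pvAK (a b : List Char) : pvBK (a.zip b) = pvAK a b 0 := by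
  rw [pvAK_eq]
  simp

-- popping one frame off the stack performs exactly one full recursive expansion of A
theorem pvBLoop_frame (a b pref : List Char) (rest : List (List Char × List Char × List Char))
    (res : List String) :
    pvBLoop ((a, b, pref) :: rest) res = pvBLoop rest (itpCoreA a b pref res) := by
  fun_induction itpCoreA a b pref res generalizing rest with
  | case1 a b pref res k h1 =>
    rw [pvBLoop]
    simp only [pvBK_eq_pvAK]
    rw [dif_pos h1]
  | case2 a b pref res k h1 h2 =>
    rw [pvBLoop]
    simp only [pvBK_eq_pvAK]
    rw [dif_neg h1, dif_pos h2]
  | case3 a b pref res k h1 h2 pref1 pref2 res1 ih1 ih2 ih3 =>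
    rw [pvBLoop]
    simp only [pvBK_eq_pvAK]
    rw [dif_neg h1, dif_neg h2]
    show pvBLoop ((a.drop (k + 1), List.replicate (a.length - k - 1) '1', pref1) ::
          (List.replicate (a.length - k - 1) '0', b.drop (k + 1), pref2) :: rest) res =
        pvBLoop rest (itpCoreA (List.replicate (a.length - k - 1) '0') (b.drop (k + 1)) pref2 res1)
    rw [ih1, ih3]

-- ===== VERDICT (by name: the statement is the Claim_ definition above) =====
theorem interval_to_prefix_spec : Claim_equal_interval_to_prefix := by
  intro a b pref res _hdom _hpre
  show interval_to_prefix a b pref res = interval_to_prefix_alt a b pref res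
  rw [interval_to_prefix, interval_to_prefix_alt, pvBLoop_frame, pvBLoop]
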